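-- pv_equiv track=rewrite | github.com/ganavee/Solutions-to-CLRS-Algorithms | Recursion/linearSearch.py | mulLinearNoList
-- ===== SOURCE A (Python) =====
-- def mulLinearNoList(a, ele, index):
--     res = []
--     if(index == len(a)):
--         return res
--     if(a[index] == ele):
--         res.append(index)
--     ans = mulLinearNoList(a, ele, index + 1)
--     res.extend(ans)
--     return res
-- ===== SOURCE B (Python) =====
-- def mulLinearNoList(a, ele, index):
--     res = []
--     for i in range(index, len(a)):
--         if a[i] == ele:
--             res.append(i)
--     return res
-- ===== Notes on version B (the rewrite author's own statement) =====
-- stated objective: simpler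
-- what changed: Replaces the tail-style recursion (recursive call plus extend at every level) with a single iterative scan over range(index, len(a)) accumulating the result list.
import Mathlib
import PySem

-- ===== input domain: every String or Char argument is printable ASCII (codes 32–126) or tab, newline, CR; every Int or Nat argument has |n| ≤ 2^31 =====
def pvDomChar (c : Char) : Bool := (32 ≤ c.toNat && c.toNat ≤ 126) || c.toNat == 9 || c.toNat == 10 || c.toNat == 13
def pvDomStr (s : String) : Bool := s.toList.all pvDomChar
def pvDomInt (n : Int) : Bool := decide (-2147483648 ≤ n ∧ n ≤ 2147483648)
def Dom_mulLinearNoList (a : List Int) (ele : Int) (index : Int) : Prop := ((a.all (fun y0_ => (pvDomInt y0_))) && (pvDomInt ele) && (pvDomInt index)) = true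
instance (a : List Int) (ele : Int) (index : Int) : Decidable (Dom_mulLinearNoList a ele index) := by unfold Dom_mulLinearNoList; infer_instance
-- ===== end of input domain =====

-- B replaces A's recursion (recursive call + extend per level) by one iterative
-- scan from index to len(a) accumulating the hit indices (objective: simpler).

-- ===== PORT A =====
-- A recurses from index to len(a); a[index] is pyGet? (none = IndexError, outside Pre_).
def mulLinearNoList (a : List Int) (ele : Int) (index : Int) : List Int :=
  if index = (a.length : Int) then []
  else
    match h : PySem.List.pyGet? a index with
    | none => []  -- IndexError in Python; Pre_ excludes these inputs
    | some v =>
        (if v = ele then [index] else []) ++ mulLinearNoList a ele (index + 1)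
termination_by ((a.length : Int) + 1 - index).toNat
decreasing_by
  have hin : PySem.Raise.InRange a.length index := by
    by_contra hc
    rw [← PySem.List.pyGet?_eq_none_iff (xs := a)] at hc
    simp [hc] at h
  unfold PySem.Raise.InRange at hin
  omega

-- ===== PORT B =====
-- B: for i in range(index, len(a)): if a[i] == ele: res.append(i)
def mulLinearNoList_alt (a : List Int) (ele : Int) (index : Int) : List Int :=
  (PySem.List.pyRange index (a.length : Int) 1).foldl
    (fun res i =>
      match PySem.List.pyGet? a i with
      | none => res  -- unreachable inside Pre_ (IndexError in Python)
      | some v => if v = ele then res ++ [i] else res)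
    []

-- ===== PRECONDITION & SPEC =====
-- Pre_ excludes index > len(a) (A raises IndexError there, B returns []) and
-- index < -len(a) (both raise IndexError).
def Pre_mulLinearNoList (a : List Int) (ele : Int) (index : Int) : Prop :=
  -(a.length : Int) ≤ index ∧ index ≤ (a.length : Int)
instance (a : List Int) (ele : Int) (index : Int) : Decidable (Pre_mulLinearNoList a ele index) := by unfold Pre_mulLinearNoList; infer_instance

def pvWitness_mulLinearNoList : List Int × Int × Int := ([3, 1, 3], 3, 0)

def Spec_mulLinearNoList (a : List Int) (ele : Int) (index : Int) (out : List Int) : Prop := out = mulLinearNoList_alt a ele index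
instance (a : List Int) (ele : Int) (index : Int) (out : List Int) : Decidable (Spec_mulLinearNoList a ele index out) := by unfold Spec_mulLinearNoList; infer_instance

-- ===== CLAIM (what is proved, stated in full; the proofs are below) =====
def Claim_equal_mulLinearNoList : Prop := ∀ (a : List Int) (ele : Int) (index : Int), Dom_mulLinearNoList a ele index → Pre_mulLinearNoList a ele index → Spec_mulLinearNoList a ele index (mulLinearNoList a ele index)

-- ===== LEMMAS AND PROOFS =====

-- the per-index contribution both programs produce
def pvHit (a : List Int) (ele : Int) (i : Int) : List Int :=
  match PySem.List.pyGet? a i with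
  | none => []
  | some v => if v = ele then [i] else []

lemma foldl_hits (a : List Int) (ele : Int) :
    ∀ (l : List Int) (init : List Int),
      l.foldl
        (fun res i =>
          match PySem.List.pyGet? a i with
          | none => res
          | some v => if v = ele then res ++ [i] else res)
        init
        = init ++ l.flatMap (pvHit a ele) := by
  intro l
  induction l with
  | nil => intro init; simp
  | cons x xs ih =>
      intro init
      simp only [List.foldl_cons, List.flatMap_cons, ih]
      unfold pvHit
      cases PySem.List.pyGet? a x with
      | none => simp
      | some v => by_cases hv : v = ele <;> simp [hv]

lemma alt_eq_flatMap (a : List Int) (ele : Int) (index : Int) :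
    mulLinearNoList_alt a ele index
      = (PySem.List.pyRange index (a.length : Int) 1).flatMap (pvHit a ele) := by
  unfold mulLinearNoList_alt
  rw [foldl_hits]
  simp

lemma a_eq_flatMap (a : List Int) (ele : Int) (index : Int)
    (h1 : -(a.length : Int) ≤ index) (h2 : index ≤ (a.length : Int)) :
    mulLinearNoList a ele index
      = (PySem.List.pyRange index (a.length : Int) 1).flatMap (pvHit a ele) := by
  by_cases he : index = (a.length : Int)
  · rw [mulLinearNoList, if_pos he, he, PySem.List.pyRange_one_eq_nil le_rfl]
    simp
  · have hlt : index < (a.length : Int) := lt_of_le_of_ne h2 he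
    have ih := a_eq_flatMap a ele (index + 1) (by omega) (by omega)
    rw [mulLinearNoList, if_neg he, PySem.List.pyRange_one_cons hlt,
        List.flatMap_cons, ih]
    unfold pvHit
    cases hg : PySem.List.pyGet? a index with
    | none =>
        rw [PySem.List.pyGet?_eq_none_iff] at hg
        exact absurd (by unfold PySem.Raise.InRange; omega) hg
    | some v => rfl
termination_by ((a.length : Int) + 1 - index).toNat
decreasing_by omega

-- ===== VERDICT (by name: the statement is the Claim_ definition above) =====
theorem mulLinearNoList_spec : Claim_equal_mulLinearNoList := by
  intro a ele index _ hpre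
  unfold Spec_mulLinearNoList
  rw [a_eq_flatMap a ele index hpre.1 hpre.2, alt_eq_flatMap]
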